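-- pv_equiv track=rewrite | github.com/xuan8195/Peerfolio---AI-Driven-Portfolio-Diversifier | Peerfolio/utils/peer_matcher.py | _is_compatible_style
-- ===== SOURCE A (Python) =====
-- def _is_compatible_style(style1: str, style2: str) -> bool:
--     """Check if investment styles are compatible"""
--     compatible_groups = [
--         ["Conservative", "Moderate"],
--         ["Moderate", "Aggressive"],
--         ["Tech-focused", "Aggressive"],
--         ["ESG-focused", "Moderate"],
--         ["Crypto-focused", "Aggressive"]
--     ]
--
--     for group in compatible_groups:
--         if style1 in group and style2 in group:
--             return True
--     return False
-- ===== SOURCE B (Python) =====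
-- _COMPAT_GROUPS = [
--     ["Conservative", "Moderate"],
--     ["Moderate", "Aggressive"],
--     ["Tech-focused", "Aggressive"],
--     ["ESG-focused", "Moderate"],
--     ["Crypto-focused", "Aggressive"],
-- ]
--
-- def _build_index(groups):
--     compat = {}
--     for group in groups:
--         for a in group:
--             for b in group:
--                 compat.setdefault(a, set()).add(b)
--     return compat
--
-- _COMPAT_INDEX = _build_index(_COMPAT_GROUPS)
--
-- def _is_compatible_style(style1: str, style2: str) -> bool:
--     """Check if investment styles are compatible"""
--     return style2 in _COMPAT_INDEX.get(style1, set())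
-- ===== Notes on version B (the rewrite author's own statement) =====
-- stated objective: idiomatic
-- what changed: B precomputes once a dict mapping each style to the set of styles sharing a group with it (self-pairs included), so the function body is a single dict lookup plus set membership instead of scanning the group list with paired membership tests.
import Mathlib
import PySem

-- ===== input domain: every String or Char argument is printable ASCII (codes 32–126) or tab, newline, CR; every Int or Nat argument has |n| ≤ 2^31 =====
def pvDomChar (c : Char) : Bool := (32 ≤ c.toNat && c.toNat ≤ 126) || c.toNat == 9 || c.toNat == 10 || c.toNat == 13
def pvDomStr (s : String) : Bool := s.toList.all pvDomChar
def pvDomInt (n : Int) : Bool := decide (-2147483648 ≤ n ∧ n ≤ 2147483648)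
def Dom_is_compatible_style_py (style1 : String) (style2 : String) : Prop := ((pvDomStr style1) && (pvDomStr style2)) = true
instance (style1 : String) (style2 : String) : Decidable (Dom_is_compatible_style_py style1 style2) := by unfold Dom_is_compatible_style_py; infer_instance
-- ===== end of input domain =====

-- B replaces A's scan over the group list (two membership tests per group) by a
-- precomputed dict from each style to the set of styles sharing a group with it,
-- so the body is one lookup; objective: idiomatic (no speed claim).

-- ===== PORT A =====
def pvCompatGroups : List (List String) :=
  [["Conservative", "Moderate"],
   ["Moderate", "Aggressive"],
   ["Tech-focused", "Aggressive"],
   ["ESG-focused", "Moderate"],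
   ["Crypto-focused", "Aggressive"]]

-- 'for group in compatible_groups: if style1 in group and style2 in group: return True' / 'return False'
def pvLoopA (style1 style2 : String) : List (List String) → Bool
  | [] => false
  | g :: rest => if g.contains style1 && g.contains style2 then true else pvLoopA style1 style2 rest

def is_compatible_style_py (style1 : String) (style2 : String) : Bool :=
  pvLoopA style1 style2 pvCompatGroups

-- ===== PORT B =====
-- _build_index: for group: for a in group: for b in group: compat.setdefault(a, set()).add(b)
def pvBuildIndex (groups : List (List String)) : PySem.Dict String (PySem.Set String) :=
  groups.foldl (fun d group =>
    group.foldl (fun d a =>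
      group.foldl (fun d b =>
        PySem.Dict.modify d a PySem.Set.empty (fun s => PySem.Set.add s b)) d) d)
    PySem.Dict.empty

def pvCompatIndex : PySem.Dict String (PySem.Set String) := pvBuildIndex pvCompatGroups

-- 'return style2 in _COMPAT_INDEX.get(style1, set())'
def is_compatible_style_py_alt (style1 : String) (style2 : String) : Bool :=
  PySem.Set.contains (PySem.Dict.getD pvCompatIndex style1 PySem.Set.empty) style2

-- ===== PRECONDITION & SPEC =====
def Spec_is_compatible_style_py (style1 : String) (style2 : String) (out : Bool) : Prop := out = is_compatible_style_py_alt style1 style2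
instance (style1 : String) (style2 : String) (out : Bool) : Decidable (Spec_is_compatible_style_py style1 style2 out) := by unfold Spec_is_compatible_style_py; infer_instance

-- ===== CLAIM (what is proved, stated in full; the proofs are below) =====
def Claim_equal_is_compatible_style_py : Prop := ∀ (style1 : String) (style2 : String), Dom_is_compatible_style_py style1 style2 → Spec_is_compatible_style_py style1 style2 (is_compatible_style_py style1 style2)

-- ===== LEMMAS AND PROOFS =====
theorem pv_main (s1 s2 : String) :
    is_compatible_style_py s1 s2 = is_compatible_style_py_alt s1 s2 := by
  have hidx : pvCompatIndex = PySem.Dict.mk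
      [("Conservative", ["Conservative", "Moderate"]),
       ("Moderate", ["Conservative", "Moderate", "Aggressive", "ESG-focused"]),
       ("Aggressive", ["Moderate", "Aggressive", "Tech-focused", "Crypto-focused"]),
       ("Tech-focused", ["Tech-focused", "Aggressive"]),
       ("ESG-focused", ["ESG-focused", "Moderate"]),
       ("Crypto-focused", ["Crypto-focused", "Aggressive"])] := by rfl
  unfold is_compatible_style_py is_compatible_style_py_alt pvCompatGroups
  rw [hidx]
  by_cases h1 : s1 = "Conservative"
  · subst h1
    simp [pvLoopA, PySem.Dict.getD, PySem.Dict.get?, PySem.Set.contains, List.find?,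
      Bool.or_comm, Bool.or_left_comm, Bool.or_assoc]
  by_cases h2 : s1 = "Moderate"
  · subst h2
    simp [pvLoopA, PySem.Dict.getD, PySem.Dict.get?, PySem.Set.contains, List.find?,
      Bool.or_comm, Bool.or_left_comm, Bool.or_assoc]
  by_cases h3 : s1 = "Aggressive"
  · subst h3
    simp [pvLoopA, PySem.Dict.getD, PySem.Dict.get?, PySem.Set.contains, List.find?,
      Bool.or_comm, Bool.or_left_comm, Bool.or_assoc]
  by_cases h4 : s1 = "Tech-focused"
  · subst h4
    simp [pvLoopA, PySem.Dict.getD, PySem.Dict.get?, PySem.Set.contains, List.find?,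
      Bool.or_comm, Bool.or_left_comm, Bool.or_assoc]
  by_cases h5 : s1 = "ESG-focused"
  · subst h5
    simp [pvLoopA, PySem.Dict.getD, PySem.Dict.get?, PySem.Set.contains, List.find?,
      Bool.or_comm, Bool.or_left_comm, Bool.or_assoc]
  by_cases h6 : s1 = "Crypto-focused"
  · subst h6
    simp [pvLoopA, PySem.Dict.getD, PySem.Dict.get?, PySem.Set.contains, List.find?,
      Bool.or_comm, Bool.or_left_comm, Bool.or_assoc]
  simp [pvLoopA, PySem.Dict.getD, PySem.Dict.get?, PySem.Set.contains, List.find?,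
    beq_eq_false_iff_ne.mpr (Ne.symm h1), beq_eq_false_iff_ne.mpr (Ne.symm h2),
    beq_eq_false_iff_ne.mpr (Ne.symm h3), beq_eq_false_iff_ne.mpr (Ne.symm h4),
    beq_eq_false_iff_ne.mpr (Ne.symm h5), beq_eq_false_iff_ne.mpr (Ne.symm h6),
    h1, h2, h3, h4, h5, h6]

-- ===== VERDICT (by name: the statement is the Claim_ definition above) =====
theorem is_compatible_style_py_spec : Claim_equal_is_compatible_style_py := by
  intro s1 s2 _
  exact pv_main s1 s2
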